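-- pv_equiv track=rewrite | github.com/LJmartin94/AdventOfCode_2021 | day7/ex01.py | calc_incremental_fuel_cost
-- ===== SOURCE A (Python) =====
-- def calc_incremental_fuel_cost(median, entry):
--     increments = abs(median - entry)
--     step_cost = 1
--     total_cost = 0
--     for _ in range(int(increments)):
--         total_cost = total_cost + step_cost
--         step_cost += 1
--     return total_cost
-- ===== SOURCE B (Python) =====
-- def calc_incremental_fuel_cost(median, entry):
--     n = abs(median - entry)
--     return n * (n + 1) // 2
-- ===== Notes on version B (the rewrite author's own statement) =====
-- stated objective: faster
-- what changed: Replaces the incremental step-cost loop with the closed-form triangular number n*(n+1)//2 for n=|median-entry|.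
import Mathlib
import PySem

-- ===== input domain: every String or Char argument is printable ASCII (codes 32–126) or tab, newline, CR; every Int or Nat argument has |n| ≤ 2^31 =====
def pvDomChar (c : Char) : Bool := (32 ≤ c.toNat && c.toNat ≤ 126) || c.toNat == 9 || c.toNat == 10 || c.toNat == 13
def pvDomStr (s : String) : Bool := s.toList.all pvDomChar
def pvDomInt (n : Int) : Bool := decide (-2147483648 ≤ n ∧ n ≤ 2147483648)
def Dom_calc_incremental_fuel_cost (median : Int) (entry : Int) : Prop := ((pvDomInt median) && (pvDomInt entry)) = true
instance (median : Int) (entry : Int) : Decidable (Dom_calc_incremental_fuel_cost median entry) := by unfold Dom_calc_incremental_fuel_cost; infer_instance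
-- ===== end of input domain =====

-- B replaces A's incremental loop by the closed-form triangular number n*(n+1)//2 (objective: faster).

-- ===== PORT A =====
-- loop state: (total_cost, step_cost); 'int(increments)' is the identity on an int
def calc_incremental_fuel_cost (median : Int) (entry : Int) : Int :=
  let increments : Int := |median - entry|
  let st := (List.range increments.toNat).foldl
    (fun (st : Int × Int) _ => (st.1 + st.2, st.2 + 1)) (0, 1)
  st.1

-- ===== PORT B =====
def calc_incremental_fuel_cost_alt (median : Int) (entry : Int) : Int :=
  let n : Int := |median - entry|
  PySem.Int.floordiv (n * (n + 1)) 2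

-- ===== PRECONDITION & SPEC =====
def Spec_calc_incremental_fuel_cost (median : Int) (entry : Int) (out : Int) : Prop := out = calc_incremental_fuel_cost_alt median entry
instance (median : Int) (entry : Int) (out : Int) : Decidable (Spec_calc_incremental_fuel_cost median entry out) := by unfold Spec_calc_incremental_fuel_cost; infer_instance

-- ===== CLAIM (what is proved, stated in full; the proofs are below) =====
def Claim_equal_calc_incremental_fuel_cost : Prop := ∀ (median : Int) (entry : Int), Dom_calc_incremental_fuel_cost median entry → Spec_calc_incremental_fuel_cost median entry (calc_incremental_fuel_cost median entry)

-- ===== LEMMAS AND PROOFS =====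
lemma pv_loop (n : Nat) :
    (List.range n).foldl (fun (st : Int × Int) _ => (st.1 + st.2, st.2 + 1)) (0, 1)
      = (((n * (n + 1) / 2 : Nat) : Int), (n : Int) + 1) := by
  induction n with
  | zero => simp
  | succ k ih =>
    rw [List.range_succ, List.foldl_append, ih]
    simp only [List.foldl_cons, List.foldl_nil]
    have h2 : (k + 1) * (k + 1 + 1) / 2 = k * (k + 1) / 2 + (k + 1) := by
      obtain ⟨m, hm⟩ := Nat.even_mul_succ_self k
      have hab : (k + 1) * (k + 1 + 1) = k * (k + 1) + 2 * (k + 1) := by ring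
      omega
    refine Prod.ext ?_ ?_
    · show ((k * (k + 1) / 2 : Nat) : Int) + ((k : Int) + 1) = (((k + 1) * (k + 1 + 1) / 2 : Nat) : Int)
      rw [h2]; push_cast; ring
    · show (k : Int) + 1 + 1 = ((k + 1 : Nat) : Int) + 1
      push_cast; ring

-- ===== VERDICT (by name: the statement is the Claim_ definition above) =====
theorem calc_incremental_fuel_cost_spec : Claim_equal_calc_incremental_fuel_cost := by
  intro median entry _
  unfold Spec_calc_incremental_fuel_cost calc_incremental_fuel_cost calc_incremental_fuel_cost_alt
  simp only [pv_loop]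
  set n : Nat := (|median - entry|).toNat with hn
  have habs : |median - entry| = (n : Int) := (Int.toNat_of_nonneg (abs_nonneg _)).symm
  rw [habs, PySem.Int.floordiv_eq_ediv_of_pos (by norm_num)]
  rw [show ((n : Int) * ((n : Int) + 1)) = ((n * (n + 1) : Nat) : Int) by push_cast; ring]
  omega
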